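-- pv_equiv track=rewrite | github.com/keichi/foobar | free-the-bunny-workers/solution.py | solution
-- ===== SOURCE A (Python) =====
-- from itertools import combinations
-- from math import factorial
--
-- def comb(c, r):
--     return factorial(c) / factorial(r) / factorial(c - r)
--
-- def solution(num_buns, num_required):
--     num_keys = comb(num_buns, num_required - 1)
--     num_copies = num_buns - num_required + 1
--
--     res = [[] for _ in range(num_buns)]
--
--     for key, buns in enumerate(combinations(range(num_buns), num_copies)):
--         for bun in buns:
--             res[bun].append(key)
--
--     return res
-- ===== SOURCE B (Python) =====
-- from itertools import combinations
--
--
-- def solution(num_buns, num_required):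
--     # Transposed ("gather") formulation: enumerate the key/combination list once,
--     # then build each bunny's row by scanning it for combinations containing that bunny.
--     num_copies = num_buns - num_required + 1
--     keyed = list(enumerate(combinations(range(num_buns), num_copies)))
--     return [[key for key, combo in keyed if bun in combo]
--             for bun in range(num_buns)]
-- ===== Notes on version B (the rewrite author's own statement) =====
-- stated objective: alternative
-- what changed: Replaces A's single scatter pass (appending each key into res[bun] for every bun of every combination) by a transposed gather: each row is built independently by filtering the enumerated combination list for membership of that bunny; A's unused float binomial computation (which raises on bad arguments) is dropped, so Pre_ excludes those raising inputs.
import Mathlib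
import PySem

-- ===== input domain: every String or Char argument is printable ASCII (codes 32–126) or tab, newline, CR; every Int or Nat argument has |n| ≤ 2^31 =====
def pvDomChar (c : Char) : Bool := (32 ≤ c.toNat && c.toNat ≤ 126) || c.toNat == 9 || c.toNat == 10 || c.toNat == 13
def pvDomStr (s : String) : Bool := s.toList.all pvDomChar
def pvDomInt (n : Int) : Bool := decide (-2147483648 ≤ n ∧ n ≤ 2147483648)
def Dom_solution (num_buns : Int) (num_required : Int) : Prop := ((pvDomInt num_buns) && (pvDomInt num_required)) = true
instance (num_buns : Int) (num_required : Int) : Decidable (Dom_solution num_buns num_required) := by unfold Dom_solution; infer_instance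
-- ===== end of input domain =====

-- B replaces A's single scatter pass (append key into res[bun] for each bun of each
-- combination) by a transposed gather: each row is built by filtering the enumerated
-- combination list for membership of that bunny (objective: alternative).

-- itertools.combinations(xs, k) in lexicographic order (shared library helper of both ports)
def pyCombinations : List Int → Nat → List (List Int)
  | _, 0 => [[]]
  | [], _ + 1 => []
  | x :: xs, k + 1 =>
    -- itertools returns nothing when r exceeds the pool size; short-circuit like it does
    if xs.length + 1 < k + 1 then []
    else (pyCombinations xs k).map (fun c => x :: c) ++ pyCombinations xs (k + 1)

-- ===== PORT A =====
-- res[bun].append(key): bun comes from range(num_buns), so 0 ≤ bun and bun.toNat is exact.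
def solution (num_buns : Int) (num_required : Int) : List (List Int) :=
  -- num_keys = comb(...) is computed by A but unused; it only raises (factorial of a
  -- negative) on inputs excluded by Pre_solution, so it is not ported.
  let num_copies : Int := num_buns - num_required + 1
  let res : List (List Int) := (PySem.List.pyRange 0 num_buns 1).map (fun _ => [])
  (PySem.List.enumerate (pyCombinations (PySem.List.pyRange 0 num_buns 1) num_copies.toNat)).foldl
    (fun res p =>
      p.2.foldl (fun r bun => r.set bun.toNat (r.getD bun.toNat [] ++ [p.1])) res)
    res

-- ===== PORT B =====
def solution_alt (num_buns : Int) (num_required : Int) : List (List Int) :=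
  let num_copies : Int := num_buns - num_required + 1
  let keyed := PySem.List.enumerate (pyCombinations (PySem.List.pyRange 0 num_buns 1) num_copies.toNat)
  (PySem.List.pyRange 0 num_buns 1).map (fun bun =>
    (keyed.filter (fun p => p.2.contains bun)).map (fun p => p.1))

-- ===== PRECONDITION & SPEC =====
-- A raises ValueError (factorial of a negative) unless 0 ≤ num_buns and 1 ≤ num_required ≤ num_buns + 1.
def Pre_solution (num_buns : Int) (num_required : Int) : Prop :=
  0 ≤ num_buns ∧ 1 ≤ num_required ∧ num_required ≤ num_buns + 1
instance (num_buns : Int) (num_required : Int) : Decidable (Pre_solution num_buns num_required) := by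
  unfold Pre_solution; infer_instance
def pvWitness_solution : Int × Int := (3, 2)

def Spec_solution (num_buns : Int) (num_required : Int) (out : List (List Int)) : Prop :=
  out = solution_alt num_buns num_required
instance (num_buns : Int) (num_required : Int) (out : List (List Int)) : Decidable (Spec_solution num_buns num_required out) := by
  unfold Spec_solution; infer_instance

-- ===== CLAIM (what is proved, stated in full; the proofs are below) =====
def Claim_equal_solution : Prop := ∀ (num_buns : Int) (num_required : Int), Dom_solution num_buns num_required → Pre_solution num_buns num_required → Spec_solution num_buns num_required (solution num_buns num_required)

-- ===== LEMMAS AND PROOFS =====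

-- every member of pyCombinations xs k is a sublist of xs
lemma mem_pyCombinations_sublist : ∀ (xs : List Int) (k : Nat) (c : List Int),
    c ∈ pyCombinations xs k → c.Sublist xs := by
  intro xs
  induction xs with
  | nil =>
    intro k c h
    cases k with
    | zero => simp [pyCombinations] at h; simp [h]
    | succ k => simp [pyCombinations] at h
  | cons x xs ih =>
    intro k c h
    cases k with
    | zero => simp [pyCombinations] at h; simp [h]
    | succ k =>
      simp only [pyCombinations] at h
      split at h
      · simp at h
      · simp only [List.mem_append, List.mem_map] at h
        rcases h with ⟨c', hc', rfl⟩ | h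
        · exact (ih k c' hc').cons₂ x
        · exact (ih (k + 1) c h).cons x

-- the inner loop appends `key` exactly at the positions listed in c (c nodup, in range)
lemma inner_foldl_length (key : Int) : ∀ (c : List Int) (res : List (List Int)),
    (c.foldl (fun r bun => r.set bun.toNat (r.getD bun.toNat [] ++ [key])) res).length = res.length := by
  intro c
  induction c with
  | nil => intro res; simp
  | cons b c ih => intro res; rw [List.foldl_cons, ih]; simp

lemma inner_foldl_getElem (key : Int) : ∀ (c : List Int) (res : List (List Int)) (i : Nat)
    (hi : i < res.length), c.Nodup → (∀ b ∈ c, 0 ≤ b ∧ b.toNat < res.length) →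
    (c.foldl (fun r bun => r.set bun.toNat (r.getD bun.toNat [] ++ [key])) res)[i]? =
      some (res[i] ++ if (i : Int) ∈ c then [key] else []) := by
  intro c
  induction c with
  | nil => intro res i hi _ _; simp [List.getElem?_eq_getElem hi]
  | cons b c ih =>
    intro res i hi hnd hmem
    obtain ⟨hb0, hblt⟩ := hmem b (List.mem_cons_self ..)
    rw [List.foldl_cons,
        ih (res.set b.toNat (res.getD b.toNat [] ++ [key])) i (by simpa using hi)
          (List.Nodup.of_cons hnd)
          (fun b' hb' => by have := hmem b' (List.mem_cons_of_mem _ hb'); simpa using this)]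
    congr 1
    by_cases hib : i = b.toNat
    · subst hib
      have hiInt : ((b.toNat : Nat) : Int) = b := by omega
      have hnotc : ((b.toNat : Nat) : Int) ∉ c := by
        rw [hiInt]; exact (List.nodup_cons.mp hnd).1
      rw [List.getElem_set_self (by simpa using hblt), if_neg hnotc,
          if_pos (List.mem_cons.mpr (Or.inl hiInt)), List.append_nil,
          List.getD_eq_getElem _ _ hblt]
    · have hne : (i : Int) ≠ b := by omega
      rw [List.getElem_set_ne (fun h => hib h.symm) (by simpa using hi)]
      congr 1
      simp [List.mem_cons, hne]

-- the outer loop computed at one index is the gathered filter of the pair list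
lemma outer_foldl_length : ∀ (ps : List (Int × List Int)) (res : List (List Int)),
    (ps.foldl (fun res p => p.2.foldl (fun r bun => r.set bun.toNat (r.getD bun.toNat [] ++ [p.1])) res) res).length = res.length := by
  intro ps
  induction ps with
  | nil => intro res; simp
  | cons p ps ih => intro res; rw [List.foldl_cons, ih, inner_foldl_length]

lemma outer_foldl_getElem : ∀ (ps : List (Int × List Int)) (res : List (List Int)) (i : Nat)
    (hi : i < res.length),
    (∀ p ∈ ps, p.2.Nodup ∧ ∀ b ∈ p.2, 0 ≤ b ∧ b.toNat < res.length) →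
    (ps.foldl (fun res p => p.2.foldl (fun r bun => r.set bun.toNat (r.getD bun.toNat [] ++ [p.1])) res) res)[i]? =
      some (res[i] ++ ((ps.filter (fun p => p.2.contains (i : Int))).map (fun p => p.1))) := by
  intro ps
  induction ps with
  | nil => intro res i hi _; simp [List.getElem?_eq_getElem hi]
  | cons p ps ih =>
    intro res i hi h
    obtain ⟨hnd, hmem⟩ := h p (List.mem_cons_self ..)
    have hlen := inner_foldl_length p.1 p.2 res
    have hstep := inner_foldl_getElem p.1 p.2 res i hi hnd hmem
    set res' := p.2.foldl (fun r bun => r.set bun.toNat (r.getD bun.toNat [] ++ [p.1])) res with hres'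
    have hi' : i < res'.length := by omega
    rw [List.foldl_cons, ← hres',
        ih res' i hi' (fun q hq => by
          obtain ⟨h1, h2⟩ := h q (List.mem_cons_of_mem _ hq)
          exact ⟨h1, fun b hb => by have := h2 b hb; omega⟩)]
    have hres'i : res'[i] = res[i] ++ if (i : Int) ∈ p.2 then [p.1] else [] := by
      rw [List.getElem?_eq_getElem hi'] at hstep
      exact Option.some.inj hstep
    by_cases hc : (i : Int) ∈ p.2
    · simp [hc, hres'i]
    · simp [hc, hres'i]

-- ===== VERDICT (by name: the statement is the Claim_ definition above) =====
theorem solution_spec : Claim_equal_solution := by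
  intro nb nr _ _
  unfold Spec_solution solution solution_alt
  set R := PySem.List.pyRange 0 nb 1 with hR
  set E := PySem.List.enumerate (pyCombinations R (nb - nr + 1).toNat) with hE
  set res0 : List (List Int) := R.map (fun _ => []) with hres0
  have hlen0 : res0.length = R.length := by simp [hres0]
  have hyp : ∀ p ∈ E, p.2.Nodup ∧ ∀ b ∈ p.2, 0 ≤ b ∧ b.toNat < res0.length := by
    intro p hp
    have hpC : p.2 ∈ pyCombinations R (nb - nr + 1).toNat := by
      have hmap := PySem.List.map_snd_enumerate (xs := pyCombinations R (nb - nr + 1).toNat) (s := 0)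
      rw [← hmap]
      exact List.mem_map_of_mem hp
    have hsub := mem_pyCombinations_sublist R _ p.2 hpC
    refine ⟨hsub.nodup (by rw [hR]; exact PySem.List.nodup_pyRange_one ..), ?_⟩
    intro b hb
    have hbR : b ∈ R := hsub.subset hb
    rw [hR, PySem.List.mem_pyRange_one] at hbR
    have hlR : R.length = nb.toNat := by rw [hR, PySem.List.length_pyRange_one]; omega
    refine ⟨by omega, by rw [hlen0, hlR]; omega⟩
  apply List.ext_getElem
  · rw [outer_foldl_length, hlen0, List.length_map]
  · intro i h1 h2
    have hiR : i < R.length := by simpa using h2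
    have hA := outer_foldl_getElem E res0 i (by omega) hyp
    rw [List.getElem?_eq_getElem (by rw [outer_foldl_length]; omega)] at hA
    have hA' := Option.some.inj hA
    rw [hA']
    have hRi : R[i] = (i : Int) := by
      show (PySem.List.pyRange 0 nb 1)[i]'(by simpa [hR] using hiR) = (i : Int)
      rw [PySem.List.getElem_pyRange_one]
      omega
    have hres0i : res0[i]'(by omega) = [] := by simp [hres0]
    rw [hres0i, List.getElem_map, hRi, List.nil_append]
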